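-- pv_equiv track=rewrite | github.com/SpencerBelleau/stegodon | modules/funcs.py | createNameData
-- ===== SOURCE A (Python) =====
-- def getMaxLength(base): #Not sure if there's a real pattern here that can be done fast
-- 	if(base == 2):
-- 		return 8
-- 	elif(base == 3):
-- 		return 6
-- 	elif(base >= 4 and base <= 6):
-- 		return 4
-- 	elif(base >= 7 and base <= 15):
-- 		return 3
-- 	else:
-- 		return 2
--
-- def convertToBase(n, base, baseLength = -1): #only does numbers from 0 to 255
-- 	converted = []
-- 	if(baseLength == -1):
-- 		baseLength = getMaxLength(base)
-- 	for i in range(0, baseLength):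
-- 		converted.append(0)
-- 	#should be a lot faster
-- 	for i in reversed(range(0, baseLength)):
-- 		while n >= pow(base, i):
-- 			converted[i] = converted[i] + 1
-- 			n = n - pow(base, i)
-- 	return converted
--
-- def createNameData(name = "", base = 10):
-- 	nameData = convertToBase(int(len(name)), base) #start with name length
-- 	nameList = []
-- 	for letter in name:
-- 		nameList.append(convertToBase(ord(letter), base))
-- 	for byte in nameList:
-- 		nameData.extend(byte)
-- 	return nameData
-- ===== SOURCE B (Python) =====
-- def createNameData(name="", base=10):
--     # division-based digit extraction, single flat pass over [len] + char codes
--     L = 8 if base == 2 else 6 if base == 3 else 4 if 4 <= base <= 6 else 3 if 7 <= base <= 15 else 2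
--     out = []
--     for n in [len(name)] + [ord(ch) for ch in name]:
--         for _ in range(L - 1):
--             out.append(n % base)
--             n //= base
--         out.append(n)
--     return out
-- ===== Notes on version B (the rewrite author's own statement) =====
-- stated objective: faster
-- what changed: Replaces A's per-digit repeated-subtraction while-loops (with a pow() call per iteration) and the separate nameList/extend passes by divmod digit extraction in one flat pass over [len(name)] + char codes, keeping A's un-capped top digit by putting the full remaining quotient in the last slot; Pre_ excludes base <= 0, where A's while loop never terminates.
import Mathlib
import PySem

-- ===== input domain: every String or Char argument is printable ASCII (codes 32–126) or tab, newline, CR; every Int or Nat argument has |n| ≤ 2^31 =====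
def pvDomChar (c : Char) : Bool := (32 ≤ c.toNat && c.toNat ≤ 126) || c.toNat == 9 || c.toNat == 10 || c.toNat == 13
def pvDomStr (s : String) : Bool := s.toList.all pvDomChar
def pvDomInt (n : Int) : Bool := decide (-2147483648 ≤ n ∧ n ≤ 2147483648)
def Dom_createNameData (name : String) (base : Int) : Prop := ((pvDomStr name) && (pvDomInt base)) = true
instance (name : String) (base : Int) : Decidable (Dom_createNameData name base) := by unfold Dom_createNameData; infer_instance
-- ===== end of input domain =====

-- B replaces A's per-digit repeated-subtraction loops by division/modulus digit extraction in one flat pass (objective: simpler).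


-- ===== PORT A =====
def getMaxLength (base : Int) : Int :=
  if base = 2 then 8
  else if base = 3 then 6
  else if 4 ≤ base ∧ base ≤ 6 then 4
  else if 7 ≤ base ∧ base ≤ 15 then 3
  else 2

-- the 'while n >= pow(base, i)' loop; fuel only makes the loop total
-- (for base ≥ 1 the fuel n.toNat + 1 supplied below is never exhausted; for base ≤ 0 Python diverges, excluded by Pre_)
def ctbWhile (fuel : Nat) (conv : List Int) (n p : Int) (i : Nat) : List Int × Int :=
  match fuel with
  | 0 => (conv, n)
  | f+1 => if p ≤ n then ctbWhile f (conv.set i (conv.getD i 0 + 1)) (n - p) p i else (conv, n)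

def convertToBase (n : Int) (base : Int) (baseLength : Int) : List Int :=
  let bl := if baseLength = -1 then getMaxLength base else baseLength
  let converted := (PySem.List.pyRange 0 bl 1).foldl (fun acc _ => acc ++ [(0 : Int)]) []
  let st := (PySem.List.pyRange 0 bl 1).reverse.foldl
    (fun (st : List Int × Int) i => ctbWhile (st.2.toNat + 1) st.1 st.2 (base ^ i.toNat) i.toNat)
    (converted, n)
  st.1

def createNameData (name : String) (base : Int) : List Int :=
  let nameData := convertToBase (PySem.Str.len name) base (-1)
  let nameList := name.toList.foldl (fun acc letter => acc ++ [convertToBase ((letter.toNat : Int)) base (-1)]) []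
  nameList.foldl (fun nd byte => nd ++ byte) nameData

-- ===== PORT B =====
def createNameData_alt (name : String) (base : Int) : List Int :=
  let L : Int :=
    if base = 2 then 8
    else if base = 3 then 6
    else if 4 ≤ base ∧ base ≤ 6 then 4
    else if 7 ≤ base ∧ base ≤ 15 then 3
    else 2
  (PySem.Str.len name :: name.toList.map (fun ch => (ch.toNat : Int))).foldl
    (fun out n0 =>
      let st := (PySem.List.pyRange 0 (L - 1) 1).foldl
        (fun (st : List Int × Int) _ => (st.1 ++ [PySem.Int.mod st.2 base], PySem.Int.floordiv st.2 base))
        (out, n0)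
      st.1 ++ [st.2]) []

-- ===== PRECONDITION & SPEC =====
-- Pre_ excludes base ≤ 0: there Python's A never returns (the while loop runs forever), so nothing is claimed.
def Pre_createNameData (name : String) (base : Int) : Prop := 1 ≤ base
instance (name : String) (base : Int) : Decidable (Pre_createNameData name base) := by unfold Pre_createNameData; infer_instance
def pvWitness_createNameData : String × Int := ("ab", 10)
def Spec_createNameData (name : String) (base : Int) (out : List Int) : Prop := out = createNameData_alt name base
instance (name : String) (base : Int) (out : List Int) : Decidable (Spec_createNameData name base out) := by unfold Spec_createNameData; infer_instance

-- ===== CLAIM (what is proved, stated in full; the proofs are below) =====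
def Claim_equal_createNameData : Prop := ∀ (name : String) (base : Int), Dom_createNameData name base → Pre_createNameData name base → Spec_createNameData name base (createNameData name base)

-- ===== LEMMAS AND PROOFS =====

-- B's low digits (n % base, then recurse on n // base) and the value left for the top slot
def lowDigits (base : Int) : Nat → Int → List Int
  | 0, _ => []
  | k+1, n => PySem.Int.mod n base :: lowDigits base k (PySem.Int.floordiv n base)

def remVal (base : Int) : Nat → Int → Int
  | 0, n => n
  | k+1, n => remVal base k (PySem.Int.floordiv n base)

-- A's digit list, top-down: slot L gets n / base^L, the rest works on n % base^L
def digA (base : Int) : Nat → Int → List Int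
  | 0, _ => []
  | L+1, n => digA base L (n % base ^ L) ++ [n / base ^ L]

theorem ctbWhile_spec (f : Nat) (conv : List Int) (n p : Int) (i : Nat)
    (hn : 0 ≤ n) (hp : 0 < p) (hf : n < (f : Int)) (hi : i < conv.length) :
    ctbWhile f conv n p i = (conv.set i (conv.getD i 0 + n / p), n % p) := by
  induction f generalizing conv n with
  | zero => exact absurd hf (by omega)
  | succ f ih =>
    unfold ctbWhile
    by_cases h : p ≤ n
    · simp only [if_pos h]
      rw [ih (conv.set i (conv.getD i 0 + 1)) (n - p) (by omega) (by push_cast at hf ⊢; omega)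
          (by simpa using hi)]
      have hq : (n - p) / p = n / p - 1 := by
        have h4 : (n - p + p * 1) / p = (n - p) / p + 1 := Int.add_mul_ediv_left (n - p) 1 (by omega)
        have h5 : n - p + p * 1 = n := by ring
        rw [h5] at h4; omega
      have hr : (n - p) % p = n % p := by
        have h4 : (n - p + p * 1) % p = (n - p) % p := Int.add_mul_emod_self_left (n - p) p 1
        have h5 : n - p + p * 1 = n := by ring
        rw [h5] at h4; omega
      rw [hq, hr, List.set_set]
      congr 2
      have : (conv.set i (conv.getD i 0 + 1)).getD i 0 = conv.getD i 0 + 1 := by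
        simp [List.getD_eq_getElem?_getD, hi]
      rw [this]; ring
    · simp only [if_neg h]
      have h1 : n / p = 0 := Int.ediv_eq_zero_of_lt hn (by omega)
      have h2 : n % p = n := Int.emod_eq_of_lt hn (by omega)
      rw [h1, h2, add_zero]
      congr 1
      apply List.ext_getElem (by simp)
      intro j hj _
      by_cases hij : i = j
      · subst hij; simp [List.getD_eq_getElem?_getD, List.getElem?_eq_getElem hi]
      · simp [hij]

-- the reversed index loop of convertToBase, on a buffer whose first L cells are 0
theorem afold_spec (base : Int) (hb : 1 ≤ base) :
    ∀ (L : Nat) (conv : List Int) (n : Int), 0 ≤ n → L ≤ conv.length →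
    (∀ i, i < L → conv.getD i 0 = 0) →
    ((List.range L).reverse.foldl
      (fun (st : List Int × Int) k => ctbWhile (st.2.toNat + 1) st.1 st.2 (base ^ k) k) (conv, n))
    = (digA base L n ++ conv.drop L, if L = 0 then n else 0) := by
  intro L
  induction L with
  | zero => intro conv n _ _ _; simp [digA]
  | succ L ih =>
    intro conv n hn hL h0
    have hpow : (0 : Int) < base ^ L := pow_pos (by omega) L
    have hstep : ctbWhile (n.toNat + 1) conv n (base ^ L) L
        = (conv.set L (conv.getD L 0 + n / base ^ L), n % base ^ L) := by
      apply ctbWhile_spec _ _ _ _ _ hn hpow (by push_cast; omega) (by omega)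
    rw [List.range_succ, List.reverse_append, List.reverse_singleton, List.singleton_append,
        List.foldl_cons]
    simp only [hstep, h0 L (by omega), zero_add]
    rw [ih (conv.set L (n / base ^ L)) (n % base ^ L)
        (Int.emod_nonneg n (by omega)) (by simpa using by omega)
        (by intro i hi
            rw [List.getD_eq_getElem?_getD, List.getElem?_set]
            simp only [show ¬ (L = i) by omega, if_false]
            exact h0 i (by omega))]
    refine Prod.ext ?_ ?_
    · show digA base L (n % base ^ L) ++ (conv.set L (n / base ^ L)).drop L
        = digA base (L+1) n ++ conv.drop (L+1)
      have hdrop : (conv.set L (n / base ^ L)).drop L = n / base ^ L :: conv.drop (L+1) := by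
        have hL' : L < (conv.set L (n / base ^ L)).length := by simpa using by omega
        rw [List.drop_eq_getElem_cons hL']
        congr 1
        · exact List.getElem_set_self hL'
        · rw [List.drop_set]; simp
      rw [hdrop]
      show digA base L (n % base ^ L) ++ (n / base ^ L :: conv.drop (L+1))
        = (digA base L (n % base ^ L) ++ [n / base ^ L]) ++ conv.drop (L+1)
      simp
    · by_cases hL0 : L = 0
      · subst hL0; simp
      · simp [hL0]

-- zero-initialisation loop
theorem zeros_fold (l : List Int) :
    l.foldl (fun (acc : List Int) _ => acc ++ [(0 : Int)]) [] = List.replicate l.length 0 := by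
  have h := PySem.List.foldl_append_singleton_eq_map (fun (_ : Int) => (0 : Int)) l []
  simp only [List.nil_append] at h
  rw [h, List.map_const']

theorem convertToBase_eq_digA (n base : Int) (hn : 0 ≤ n) (hb : 1 ≤ base) :
    convertToBase n base (-1) = digA base (getMaxLength base).toNat n := by
  unfold convertToBase
  have hLnn : 0 ≤ getMaxLength base := by unfold getMaxLength; split_ifs <;> norm_num
  set L := (getMaxLength base).toNat with hLdef
  have hcast : getMaxLength base = ((L : Nat) : Int) := (Int.toNat_of_nonneg hLnn).symm
  simp only [reduceIte]
  rw [hcast, zeros_fold, PySem.List.length_pyRange_one]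
  have hlen : ((L : Int) - 0).toNat = L := by omega
  rw [hlen]
  rw [PySem.List.pyRange_zero_nat, ← List.map_reverse, List.foldl_map]
  simp only [Int.toNat_natCast]
  have := afold_spec base hb L (List.replicate L 0) n hn (by simp)
    (by intro i hi; exact List.getD_replicate 0 hi)
  rw [this]
  simp

-- key division fact: (n % (b*m)) / b = (n / b) % m
theorem emod_mul_ediv (n b m : Int) (hb : 0 < b) (hm : 0 < m) :
    n % (b * m) / b = (n / b) % m := by
  have hbm : (0 : Int) < b * m := by positivity
  set q := n / (b * m) with hq
  set s := n % (b * m) with hs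
  have hs0 : 0 ≤ s := Int.emod_nonneg n (by omega)
  have hs1 : s < b * m := Int.emod_lt_of_pos n hbm
  have hn' : n = s + b * (m * q) := by
    have := Int.mul_ediv_add_emod n (b * m)
    rw [← hq, ← hs] at this; linarith [this, mul_assoc b m q]
  have h1 : n / b = s / b + m * q := by
    rw [hn']; exact Int.add_mul_ediv_left s (m * q) (by omega)
  have h2 : (s / b + m * q) % m = s / b % m := by
    have := Int.add_mul_emod_self_left (s / b) m q
    exact this
  have h3 : s / b % m = s / b := by
    apply Int.emod_eq_of_lt (Int.ediv_nonneg hs0 (by omega))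
    rw [Int.ediv_lt_iff_lt_mul hb]; linarith [hs1, mul_comm m b]
  rw [h1, h2, h3]

-- digA satisfies B's cons recurrence (for at least two slots)
theorem digA_cons (base : Int) (hb : 1 ≤ base) :
    ∀ (L : Nat), 1 ≤ L → ∀ n, 0 ≤ n →
    digA base (L+1) n = n % base :: digA base L (n / base) := by
  intro L
  induction L with
  | zero => omega
  | succ L ih =>
    intro _ n hn
    by_cases hL : L = 0
    · subst hL
      show digA base 2 n = n % base :: digA base 1 (n / base)
      simp [digA, pow_zero, pow_one]
    · have hpow : (0 : Int) < base ^ (L + 1) := pow_pos (by omega) _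
      show digA base (L+1+1) n = n % base :: digA base (L+1) (n / base)
      rw [show digA base (L+1+1) n = digA base (L+1) (n % base ^ (L+1)) ++ [n / base ^ (L+1)] from rfl]
      rw [ih (by omega) (n % base ^ (L+1)) (Int.emod_nonneg n (by omega))]
      have e1 : n % base ^ (L+1) % base = n % base :=
        Int.emod_emod_of_dvd n (dvd_pow_self base (by omega))
      have e2 : n % base ^ (L+1) / base = (n / base) % base ^ L := by
        have := emod_mul_ediv n base (base ^ L) (by omega) (pow_pos (by omega) L)
        rwa [show base * base ^ L = base ^ (L+1) by ring] at this
      have e3 : n / base ^ (L+1) = n / base / base ^ L := by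
        rw [Int.ediv_ediv_of_nonneg (by omega), show base * base ^ L = base ^ (L+1) by ring]
      rw [e1, e2, e3]
      rfl

-- A's digit list is B's: low digits then the uncapped remainder
theorem digA_eq_low_rem (base : Int) (hb : 1 ≤ base) :
    ∀ (L : Nat), ∀ n, 0 ≤ n →
    digA base (L+1) n = lowDigits base L n ++ [remVal base L n] := by
  intro L
  induction L with
  | zero => intro n hn; simp [digA, lowDigits, remVal, pow_zero]
  | succ L ih =>
    intro n hn
    rw [digA_cons base hb (L+1) (by omega) n hn,
        ih (n / base) (Int.ediv_nonneg hn (by omega))]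
    have hmod : PySem.Int.mod n base = n % base := PySem.Int.mod_eq_emod_of_pos (by omega)
    have hdiv : PySem.Int.floordiv n base = n / base := PySem.Int.floordiv_eq_ediv_of_pos (by omega)
    show (n % base) :: (lowDigits base L (n / base) ++ [remVal base L (n / base)])
      = (PySem.Int.mod n base :: lowDigits base L (PySem.Int.floordiv n base))
        ++ [remVal base L (PySem.Int.floordiv n base)]
    rw [hmod, hdiv]; simp

-- B's inner loop
theorem bfold_spec (base : Int) :
    ∀ (l : List Int) (out : List Int) (n : Int),
    l.foldl (fun (st : List Int × Int) _ =>
        (st.1 ++ [PySem.Int.mod st.2 base], PySem.Int.floordiv st.2 base)) (out, n)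
    = (out ++ lowDigits base l.length n, remVal base l.length n) := by
  intro l
  induction l with
  | nil => intro out n; simp [lowDigits, remVal]
  | cons x t ih =>
    intro out n
    rw [List.foldl_cons, ih]
    simp [lowDigits, remVal]

theorem getMaxLength_ge_two (base : Int) : 2 ≤ getMaxLength base := by
  unfold getMaxLength; split_ifs <;> norm_num

-- ===== VERDICT (by name: the statement is the Claim_ definition above) =====
theorem createNameData_spec : Claim_equal_createNameData := by
  intro name base _ hpre
  unfold Pre_createNameData at hpre
  unfold Spec_createNameData createNameData createNameData_alt
  have hLb : (if base = 2 then (8 : Int) else if base = 3 then 6 else if 4 ≤ base ∧ base ≤ 6 then 4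
      else if 7 ≤ base ∧ base ≤ 15 then 3 else 2) = getMaxLength base := rfl
  rw [hLb]
  have hL2 : 2 ≤ getMaxLength base := getMaxLength_ge_two base
  set Ln := (getMaxLength base).toNat with hLn
  have hLn2 : 2 ≤ Ln := by omega
  have hk : ((getMaxLength base - 1).toNat) = Ln - 1 := by omega
  -- per-value equality
  have hval : ∀ n : Int, 0 ≤ n →
      convertToBase n base (-1) = lowDigits base (Ln - 1) n ++ [remVal base (Ln - 1) n] := by
    intro n hn
    rw [convertToBase_eq_digA n base hn hpre, ← hLn]
    have : Ln = (Ln - 1) + 1 := by omega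
    rw [this]
    exact digA_eq_low_rem base hpre (Ln - 1) n hn
  have hlen0 : (0 : Int) ≤ PySem.Str.len name := by rw [PySem.Str.len_eq]; positivity
  -- A side: nameList loop is a map, extend loop is a flatMap
  rw [PySem.List.foldl_append_singleton_eq_map (fun letter : Char => convertToBase ((letter.toNat : Int)) base (-1)) name.toList []]
  rw [List.nil_append]
  rw [show (fun (nd byte : List Int) => nd ++ byte) = (fun (nd : List Int) (byte : List Int) => nd ++ id byte) from rfl]
  rw [PySem.List.foldl_append_eq_flatMap id (name.toList.map (fun letter : Char => convertToBase ((letter.toNat : Int)) base (-1))) (convertToBase (PySem.Str.len name) base (-1))]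
  -- B side: inner loop rewritten, outer loop is a flatMap
  have hinner : ∀ (out : List Int) (n0 : Int),
      ((PySem.List.pyRange 0 (getMaxLength base - 1) 1).foldl
        (fun (st : List Int × Int) _ => (st.1 ++ [PySem.Int.mod st.2 base], PySem.Int.floordiv st.2 base))
        (out, n0))
      = (out ++ lowDigits base (Ln - 1) n0, remVal base (Ln - 1) n0) := by
    intro out n0
    rw [bfold_spec base]
    rw [PySem.List.length_pyRange_one]
    have hX : (getMaxLength base - 1 - 0).toNat = Ln - 1 := by omega
    rw [hX]
  have hstep : (fun (out : List Int) (n0 : Int) =>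
      (((PySem.List.pyRange 0 (getMaxLength base - 1) 1).foldl
        (fun (st : List Int × Int) _ => (st.1 ++ [PySem.Int.mod st.2 base], PySem.Int.floordiv st.2 base))
        (out, n0)).1
       ++ [((PySem.List.pyRange 0 (getMaxLength base - 1) 1).foldl
        (fun (st : List Int × Int) _ => (st.1 ++ [PySem.Int.mod st.2 base], PySem.Int.floordiv st.2 base))
        (out, n0)).2]))
      = (fun (out : List Int) (n0 : Int) => out ++ (lowDigits base (Ln - 1) n0 ++ [remVal base (Ln - 1) n0])) := by
    funext out n0
    rw [hinner out n0]
    simp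
  simp only [hstep]
  rw [PySem.List.foldl_append_eq_flatMap
      (fun n0 : Int => lowDigits base (Ln - 1) n0 ++ [remVal base (Ln - 1) n0])
      (PySem.Str.len name :: name.toList.map (fun ch => (ch.toNat : Int))) []]
  rw [List.nil_append, List.flatMap_cons]
  rw [hval (PySem.Str.len name) hlen0]
  congr 1
  rw [List.flatMap_map, List.flatMap_def, List.flatMap_def, List.map_map]
  congr 1
  apply List.map_congr_left
  intro c _
  simp only [id, Function.comp]
  rw [hval ((c.toNat : Int)) (by positivity)]
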